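-- pv_equiv track=rewrite | github.com/timon-schmelzer-gcx/AdventOfCode-2019 | days/3/solution.py | find_interceptions_and_return_both_fast
-- ===== SOURCE A (Python) =====
-- def find_interceptions_and_return_both_fast(positions_one, positions_two):
--     interceptions_one = list(set(positions_one).intersection(positions_two))
--     interceptions_two = list(set(positions_two).intersection(positions_one))
--
--     # WARNING: Not sorting the interception lists will cause
--     # arbitrary behaviour! You can test it by commenting out
--     # one of the next two lines and runing the script multiple times.
--     interceptions_one = sorted(interceptions_one)
--     interceptions_two = sorted(interceptions_two)
--
--     return [
--         point_pair for point_pair in zip(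
--             interceptions_one, interceptions_two
--         )
--     ]
-- ===== SOURCE B (Python) =====
-- def find_interceptions_and_return_both_fast(positions_one, positions_two):
--     xs = sorted(positions_one)
--     ys = sorted(positions_two)
--     common = []
--     i = j = 0
--     while i < len(xs) and j < len(ys):
--         if xs[i] < ys[j]:
--             i += 1
--         elif ys[j] < xs[i]:
--             j += 1
--         else:
--             p = xs[i]
--             common.append(p)
--             while i < len(xs) and xs[i] == p:
--                 i += 1
--             while j < len(ys) and ys[j] == p:
--                 j += 1
--     return [(p, p) for p in common]
-- ===== Notes on version B (the rewrite author's own statement) =====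
-- stated objective: alternative
-- what changed: Replaces the two hash-set intersections plus two sorts and a zip with a single sort of each input followed by one deduplicating two-pointer merge that emits the unique common points in sorted order, then self-pairs them.
import Mathlib
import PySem

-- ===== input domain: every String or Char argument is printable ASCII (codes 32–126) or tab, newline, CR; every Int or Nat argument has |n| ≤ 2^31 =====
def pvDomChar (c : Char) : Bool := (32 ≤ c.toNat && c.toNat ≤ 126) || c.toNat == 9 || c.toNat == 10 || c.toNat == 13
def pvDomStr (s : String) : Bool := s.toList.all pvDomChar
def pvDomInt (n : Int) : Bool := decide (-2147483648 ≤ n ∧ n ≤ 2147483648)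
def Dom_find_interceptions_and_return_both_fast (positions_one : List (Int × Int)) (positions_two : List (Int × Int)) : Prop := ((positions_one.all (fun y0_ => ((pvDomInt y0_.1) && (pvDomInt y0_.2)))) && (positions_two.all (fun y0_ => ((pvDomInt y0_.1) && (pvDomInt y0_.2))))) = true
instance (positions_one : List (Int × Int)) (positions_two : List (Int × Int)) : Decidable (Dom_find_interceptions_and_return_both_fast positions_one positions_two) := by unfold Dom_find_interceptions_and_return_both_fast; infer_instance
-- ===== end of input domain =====

-- B replaces A's two set intersections + two sorts + zip by one sort of each input and a
-- deduplicating two-pointer merge (alternative decomposition; no speed claim).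

-- ===== PORT A =====
-- A: set(p1) & p2, set(p2) & p1, both sorted (Python tuple order = lex order, ported as the
-- injective key 'toLex'), then zipped.  Exact: list(set) order is erased by the sort.
def find_interceptions_and_return_both_fast (positions_one : List (Int × Int)) (positions_two : List (Int × Int)) : List ((Int × Int) × (Int × Int)) :=
  let interceptions_one := PySem.Set.inter (PySem.Set.ofList positions_one) positions_two
  let interceptions_two := PySem.Set.inter (PySem.Set.ofList positions_two) positions_one
  let sorted_one := PySem.List.sorted interceptions_one (fun p => toLex p) false
  let sorted_two := PySem.List.sorted interceptions_two (fun p => toLex p) false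
  sorted_one.zip sorted_two

-- ===== PORT B =====
-- the inner 'while xs[i] == p: i += 1' loops of Source B
def pvSkipEq (p : Int × Int) : List (Int × Int) → List (Int × Int)
  | [] => []
  | x :: xs => if x = p then pvSkipEq p xs else x :: xs

theorem pvSkipEq_length_le (p : Int × Int) (xs : List (Int × Int)) :
    (pvSkipEq p xs).length ≤ xs.length := by
  induction xs with
  | nil => simp [pvSkipEq]
  | cons x xs ih =>
    by_cases h : x = p <;> simp [pvSkipEq, h]
    omega

-- the outer two-pointer while loop of Source B
def pvMerge : List (Int × Int) → List (Int × Int) → List (Int × Int)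
  | [], _ => []
  | _ :: _, [] => []
  | a :: as_, b :: bs =>
    if toLex a < toLex b then pvMerge as_ (b :: bs)
    else if toLex b < toLex a then pvMerge (a :: as_) bs
    else a :: pvMerge (pvSkipEq a as_) (pvSkipEq a bs)
termination_by xs ys => xs.length + ys.length
decreasing_by
  all_goals
    have h1 := pvSkipEq_length_le a as_
    have h2 := pvSkipEq_length_le a bs
    simp
    try omega

def find_interceptions_and_return_both_fast_alt (positions_one : List (Int × Int)) (positions_two : List (Int × Int)) : List ((Int × Int) × (Int × Int)) :=
  let xs := PySem.List.sorted positions_one (fun p => toLex p) false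
  let ys := PySem.List.sorted positions_two (fun p => toLex p) false
  (pvMerge xs ys).map (fun p => (p, p))

-- ===== PRECONDITION & SPEC =====
def Spec_find_interceptions_and_return_both_fast (positions_one : List (Int × Int)) (positions_two : List (Int × Int)) (out : List ((Int × Int) × (Int × Int))) : Prop := out = find_interceptions_and_return_both_fast_alt positions_one positions_two
instance (positions_one : List (Int × Int)) (positions_two : List (Int × Int)) (out : List ((Int × Int) × (Int × Int))) : Decidable (Spec_find_interceptions_and_return_both_fast positions_one positions_two out) := by unfold Spec_find_interceptions_and_return_both_fast; infer_instance

-- ===== CLAIM (what is proved, stated in full; the proofs are below) =====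
def Claim_equal_find_interceptions_and_return_both_fast : Prop := ∀ (positions_one : List (Int × Int)) (positions_two : List (Int × Int)), Dom_find_interceptions_and_return_both_fast positions_one positions_two → Spec_find_interceptions_and_return_both_fast positions_one positions_two (find_interceptions_and_return_both_fast positions_one positions_two)

-- ===== LEMMAS AND PROOFS =====

theorem pv_zip_self {α : Type} (s : List α) : s.zip s = s.map (fun p => (p, p)) := by
  induction s with
  | nil => rfl
  | cons x xs ih => simp only [List.zip_cons_cons, List.map_cons]; exact congrArg _ ih

theorem pvSkipEq_sublist (p : Int × Int) (xs : List (Int × Int)) :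
    (pvSkipEq p xs).Sublist xs := by
  induction xs with
  | nil => simp [pvSkipEq]
  | cons x xs ih =>
    by_cases h : x = p
    · simpa [pvSkipEq, h] using ih.trans (List.sublist_cons_self x xs)
    · simp [pvSkipEq, h]

theorem pvSkipEq_mem (p : Int × Int) (xs : List (Int × Int))
    (hs : xs.Pairwise (fun u v => toLex u ≤ toLex v))
    (hall : ∀ x ∈ xs, toLex p ≤ toLex x) (z : Int × Int) :
    z ∈ pvSkipEq p xs ↔ z ∈ xs ∧ z ≠ p := by
  induction xs with
  | nil => simp [pvSkipEq]
  | cons x xs ih =>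
    by_cases h : x = p
    · rw [pvSkipEq, if_pos h]
      rw [ih hs.tail (fun y hy => hall y (List.mem_cons_of_mem x hy))]
      subst h
      constructor
      · rintro ⟨hz, hne⟩; exact ⟨List.mem_cons_of_mem x hz, hne⟩
      · rintro ⟨hz, hne⟩
        rcases List.mem_cons.mp hz with rfl | hz
        · exact absurd rfl hne
        · exact ⟨hz, hne⟩
    · rw [pvSkipEq, if_neg h]
      have hxp : toLex p < toLex x :=
        lt_of_le_of_ne (hall x List.mem_cons_self) (fun he => h (toLex.injective he.symm))
      constructor
      · intro hz
        refine ⟨hz, ?_⟩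
        rcases List.mem_cons.mp hz with rfl | hz
        · exact h
        · intro he; subst he
          have := List.Pairwise.rel_head_tail (l := x :: xs) hs hz
          exact absurd (lt_of_lt_of_le hxp this) (lt_irrefl _)
      · exact fun hz => hz.1

theorem pvSkipEq_all_gt (p : Int × Int) (xs : List (Int × Int))
    (hs : xs.Pairwise (fun u v => toLex u ≤ toLex v))
    (hall : ∀ x ∈ xs, toLex p ≤ toLex x) (z : Int × Int) (hz : z ∈ pvSkipEq p xs) :
    toLex p < toLex z := by
  obtain ⟨hmem, hne⟩ := (pvSkipEq_mem p xs hs hall z).mp hz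
  exact lt_of_le_of_ne (hall z hmem) (fun he => hne (toLex.injective he.symm))

theorem pvMerge_spec (xs ys : List (Int × Int))
    (hx : xs.Pairwise (fun u v => toLex u ≤ toLex v))
    (hy : ys.Pairwise (fun u v => toLex u ≤ toLex v)) :
    (pvMerge xs ys).Pairwise (fun u v => toLex u < toLex v) ∧
      (∀ z, z ∈ pvMerge xs ys ↔ z ∈ xs ∧ z ∈ ys) := by
  induction xs, ys using pvMerge.induct with
  | case1 ys => simp [pvMerge]
  | case2 a as_ => simp [pvMerge]
  | case3 a as_ b bs hlt ih =>
    rw [pvMerge, if_pos hlt]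
    obtain ⟨hp, hm⟩ := ih hx.tail hy
    refine ⟨hp, fun z => ?_⟩
    rw [hm z]
    constructor
    · rintro ⟨hz1, hz2⟩; exact ⟨List.mem_cons_of_mem a hz1, hz2⟩
    · rintro ⟨hz1, hz2⟩
      rcases List.mem_cons.mp hz1 with rfl | hz1
      · -- z = a ∈ b :: bs contradicts a < b ≤ everything in b :: bs
        exfalso
        rcases List.mem_cons.mp hz2 with rfl | hz2
        · exact absurd hlt (lt_irrefl _)
        · have := List.Pairwise.rel_head_tail (l := b :: bs) hy hz2
          exact absurd (lt_of_lt_of_le hlt this) (lt_irrefl _)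
      · exact ⟨hz1, hz2⟩
  | case4 a as_ b bs hnlt hlt ih =>
    rw [pvMerge, if_neg hnlt, if_pos hlt]
    obtain ⟨hp, hm⟩ := ih hx hy.tail
    refine ⟨hp, fun z => ?_⟩
    rw [hm z]
    constructor
    · rintro ⟨hz1, hz2⟩; exact ⟨hz1, List.mem_cons_of_mem b hz2⟩
    · rintro ⟨hz1, hz2⟩
      rcases List.mem_cons.mp hz2 with rfl | hz2
      · exfalso
        rcases List.mem_cons.mp hz1 with rfl | hz1
        · exact absurd hlt (lt_irrefl _)
        · have := List.Pairwise.rel_head_tail (l := a :: as_) hx hz1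
          exact absurd (lt_of_lt_of_le hlt this) (lt_irrefl _)
      · exact ⟨hz1, hz2⟩
  | case5 a as_ b bs hnlt1 hnlt2 ih =>
    rw [pvMerge, if_neg hnlt1, if_neg hnlt2]
    have hab : a = b := toLex.injective (le_antisymm (not_lt.mp hnlt2) (not_lt.mp hnlt1))
    subst hab
    have hallx : ∀ x ∈ as_, toLex a ≤ toLex x := fun x hx' =>
      List.Pairwise.rel_head_tail (l := a :: as_) hx hx'
    have hally : ∀ x ∈ bs, toLex a ≤ toLex x := fun x hx' =>
      List.Pairwise.rel_head_tail (l := a :: bs) hy hx'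
    have hsx : (pvSkipEq a as_).Pairwise (fun u v => toLex u ≤ toLex v) :=
      List.Pairwise.sublist (pvSkipEq_sublist a as_) hx.tail
    have hsy : (pvSkipEq a bs).Pairwise (fun u v => toLex u ≤ toLex v) :=
      List.Pairwise.sublist (pvSkipEq_sublist a bs) hy.tail
    obtain ⟨hp, hm⟩ := ih hsx hsy
    constructor
    · refine List.pairwise_cons.mpr ⟨fun z hz => ?_, hp⟩
      obtain ⟨hz1, _⟩ := (hm z).mp hz
      exact pvSkipEq_all_gt a as_ hx.tail hallx z hz1
    · intro z
      rw [List.mem_cons, hm z,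
        pvSkipEq_mem a as_ hx.tail hallx z, pvSkipEq_mem a bs hy.tail hally z]
      by_cases hza : z = a
      · subst hza; simp
      · simp [hza]

theorem find_interceptions_and_return_both_fast_spec : Claim_equal_find_interceptions_and_return_both_fast := by
  intro p1 p2 _
  unfold Spec_find_interceptions_and_return_both_fast
  unfold find_interceptions_and_return_both_fast find_interceptions_and_return_both_fast_alt
  simp only
  -- names
  set i1 := PySem.Set.inter (PySem.Set.ofList p1) p2 with hi1
  set i2 := PySem.Set.inter (PySem.Set.ofList p2) p1 with hi2
  have hmem1 : ∀ z, z ∈ i1 ↔ z ∈ p1 ∧ z ∈ p2 := by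
    intro z; rw [hi1, PySem.Set.mem_inter, PySem.Set.mem_ofList]
  have hmem2 : ∀ z, z ∈ i2 ↔ z ∈ p2 ∧ z ∈ p1 := by
    intro z; rw [hi2, PySem.Set.mem_inter, PySem.Set.mem_ofList]
  have hnd1 : i1.Nodup := PySem.Set.nodup_inter _ _ (PySem.Set.nodup_ofList p1)
  have hnd2 : i2.Nodup := PySem.Set.nodup_inter _ _ (PySem.Set.nodup_ofList p2)
  -- merge of the two sorted inputs
  obtain ⟨hp, hm⟩ := pvMerge_spec (PySem.List.sorted p1 (fun p => toLex p) false)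
      (PySem.List.sorted p2 (fun p => toLex p) false)
      (PySem.List.sorted_pairwise p1 (fun p => toLex p))
      (PySem.List.sorted_pairwise p2 (fun p => toLex p))
  set w := pvMerge (PySem.List.sorted p1 (fun p => toLex p) false)
      (PySem.List.sorted p2 (fun p => toLex p) false) with hw
  have hwmem : ∀ z, z ∈ w ↔ z ∈ p1 ∧ z ∈ p2 := by
    intro z; rw [hm z, PySem.List.mem_sorted, PySem.List.mem_sorted]
  have hwnd : w.Nodup :=
    List.Pairwise.imp (fun {u v} (h : toLex u < toLex v) (he : u = v) => absurd (he ▸ h) (lt_irrefl _)) hp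
  have hperm1 : w.Perm i1 := by
    rw [List.perm_ext_iff_of_nodup hwnd hnd1]
    intro z; rw [hwmem z, hmem1 z]
  have hperm2 : w.Perm i2 := by
    rw [List.perm_ext_iff_of_nodup hwnd hnd2]
    intro z; rw [hwmem z, hmem2 z]; exact and_comm
  have hs1 : PySem.List.sorted i1 (fun p => toLex p) false = w :=
    PySem.List.sorted_eq_of_perm_of_pairwise_lt i1 w (fun p => toLex p) hperm1 hp
  have hs2 : PySem.List.sorted i2 (fun p => toLex p) false = w :=
    PySem.List.sorted_eq_of_perm_of_pairwise_lt i2 w (fun p => toLex p) hperm2 hp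
  rw [hs1, hs2, pv_zip_self]
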